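-- pv_equiv track=rewrite | github.com/seblm01/ProjectEulerExercices- | main.py | commonMultiplesList
-- ===== SOURCE A (Python) =====
-- def commonMultiplesList(limit, multiple1, multiple2):
--   # Déclaration de la liste (vide)
--   listInt = []
--   #Déclaration du nombre de référence à incrémenter à chaque tour de boucle
--   currentNb = 0
--
--   #boucle tourne tant que nombre de référence strictement inférieur à la limite
--   while currentNb < limit:
--     #Ajout du nombre de référence à la liste, si est seulement si, il est multiple commun aux deux entiers spécifiés en valeur d'entrée
--     if currentNb % multiple1 == 0 or currentNb % multiple2 == 0:
--       listInt.append(currentNb)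
--     #incrémentation du nombre de référence
--     currentNb += 1
--   #La fonction est arrivée au terme de sa tâche. Retourne la liste de multiples communs.
--   return listInt
-- ===== SOURCE B (Python) =====
-- def commonMultiplesList(limit, multiple1, multiple2):
--     # Generate the multiples of each divisor directly (O(limit/m1 + limit/m2))
--     # instead of testing every number below limit, then sort the union.
--     multiples = set(range(0, limit, abs(multiple1))) | set(range(0, limit, abs(multiple2)))
--     return sorted(multiples)
-- ===== Notes on version B (the rewrite author's own statement) =====
-- stated objective: faster
-- what changed: Instead of scanning every integer below limit and testing divisibility, B generates the multiples of each divisor directly with range steps, unions them as a set and sorts.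
-- outside the precondition, e.g. on commonMultiplesList(3, 1, 0): A returns [0, 1, 2], B raises ValueError; on commonMultiplesList(0, 0, 0): A returns [], B raises ValueError
import Mathlib
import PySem

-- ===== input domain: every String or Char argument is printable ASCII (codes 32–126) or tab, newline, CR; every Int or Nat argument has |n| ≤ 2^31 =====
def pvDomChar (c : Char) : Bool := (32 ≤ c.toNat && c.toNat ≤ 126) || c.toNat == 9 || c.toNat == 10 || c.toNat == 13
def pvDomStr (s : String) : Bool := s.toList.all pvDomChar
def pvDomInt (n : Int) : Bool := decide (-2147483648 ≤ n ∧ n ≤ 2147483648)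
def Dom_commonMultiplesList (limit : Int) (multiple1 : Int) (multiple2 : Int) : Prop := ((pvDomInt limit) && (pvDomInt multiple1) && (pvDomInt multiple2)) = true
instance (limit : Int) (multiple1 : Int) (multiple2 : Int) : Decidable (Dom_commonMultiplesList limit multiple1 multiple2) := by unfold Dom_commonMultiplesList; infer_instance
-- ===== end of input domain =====

-- B replaces A's scan of every integer below limit by generating the multiples of each
-- divisor directly and sorting their set union (objective: faster, asymptotic).


-- ===== PORT A =====
-- the 'while currentNb < limit' loop of A, carrying the list and the counter
def commonMultiplesListGo (limit : Int) (multiple1 : Int) (multiple2 : Int)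
    (listInt : List Int) (currentNb : Int) : List Int :=
  if currentNb < limit then
    commonMultiplesListGo limit multiple1 multiple2
      (if PySem.Int.mod currentNb multiple1 = 0 ∨ PySem.Int.mod currentNb multiple2 = 0
       then listInt ++ [currentNb] else listInt)
      (currentNb + 1)
  else listInt
termination_by (limit - currentNb).toNat
decreasing_by omega

def commonMultiplesList (limit : Int) (multiple1 : Int) (multiple2 : Int) : List Int :=
  commonMultiplesListGo limit multiple1 multiple2 [] 0

-- ===== PORT B =====
def commonMultiplesList_alt (limit : Int) (multiple1 : Int) (multiple2 : Int) : List Int :=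
  let s1 := PySem.Set.ofList (PySem.List.pyRange 0 limit (multiple1.natAbs : Int))
  let s2 := PySem.Set.ofList (PySem.List.pyRange 0 limit (multiple2.natAbs : Int))
  PySem.List.sorted (PySem.Set.union s1 s2) (fun x => x)

-- ===== PRECONDITION & SPEC =====
-- A raises ZeroDivisionError when a zero divisor's '%' is evaluated (and B's range step
-- would be 0); Pre_ excludes both multiples being nonzero… i.e. requires them nonzero.
-- (On the few inputs with a zero multiple where A still returns — e.g. limit ≤ 0, or
-- multiple1 = ±1 shielding '% 0' by short-circuit — B raises ValueError, so they are excluded.)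
def Pre_commonMultiplesList (limit : Int) (multiple1 : Int) (multiple2 : Int) : Prop :=
  multiple1 ≠ 0 ∧ multiple2 ≠ 0
instance (limit : Int) (multiple1 : Int) (multiple2 : Int) : Decidable (Pre_commonMultiplesList limit multiple1 multiple2) := by unfold Pre_commonMultiplesList; infer_instance

def pvWitness_commonMultiplesList : Int × Int × Int := (10, 3, 5)

def Spec_commonMultiplesList (limit : Int) (multiple1 : Int) (multiple2 : Int) (out : List Int) : Prop := out = commonMultiplesList_alt limit multiple1 multiple2
instance (limit : Int) (multiple1 : Int) (multiple2 : Int) (out : List Int) : Decidable (Spec_commonMultiplesList limit multiple1 multiple2 out) := by unfold Spec_commonMultiplesList; infer_instance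

-- ===== CLAIM (what is proved, stated in full; the proofs are below) =====
def Claim_equal_commonMultiplesList : Prop := ∀ (limit : Int) (multiple1 : Int) (multiple2 : Int), Dom_commonMultiplesList limit multiple1 multiple2 → Pre_commonMultiplesList limit multiple1 multiple2 → Spec_commonMultiplesList limit multiple1 multiple2 (commonMultiplesList limit multiple1 multiple2)

-- ===== LEMMAS AND PROOFS =====

-- the divisibility test both programs select by
def pvPred (multiple1 multiple2 n : Int) : Bool :=
  decide (PySem.Int.mod n multiple1 = 0 ∨ PySem.Int.mod n multiple2 = 0)

-- A's loop appends exactly the filtered tail range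
theorem commonMultiplesListGo_eq_filter (limit multiple1 multiple2 : Int) :
    ∀ (acc : List Int) (cur : Int),
      commonMultiplesListGo limit multiple1 multiple2 acc cur =
        acc ++ (PySem.List.pyRange cur limit 1).filter (pvPred multiple1 multiple2) := by
  intro acc cur
  induction acc, cur using commonMultiplesListGo.induct limit multiple1 multiple2 with
  | case1 acc cur hlt ih =>
    simp only [dite_eq_ite] at ih
    rw [commonMultiplesListGo, if_pos hlt, ih, PySem.List.pyRange_one_cons hlt,
        List.filter_cons]
    simp only [pvPred]
    by_cases h : PySem.Int.mod cur multiple1 = 0 ∨ PySem.Int.mod cur multiple2 = 0 <;>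
      simp [h]
  | case2 acc cur hge =>
    rw [commonMultiplesListGo, if_neg hge, PySem.List.pyRange_one_eq_nil (by omega)]
    simp

-- B equals the same filtered range
theorem commonMultiplesList_alt_eq_filter (limit multiple1 multiple2 : Int)
    (h1 : multiple1 ≠ 0) (h2 : multiple2 ≠ 0) :
    commonMultiplesList_alt limit multiple1 multiple2 =
      (PySem.List.pyRange 0 limit 1).filter (pvPred multiple1 multiple2) := by
  unfold commonMultiplesList_alt
  apply PySem.List.sorted_eq_of_perm_of_pairwise_lt
  · -- the filtered range is a permutation of the set union
    apply (List.perm_ext_iff_of_nodup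
        ((PySem.List.nodup_pyRange_one 0 limit).filter _)
        (PySem.Set.nodup_union _ _ (PySem.Set.nodup_ofList _))).mpr
    intro x
    have hp1 : (0:Int) < (multiple1.natAbs : Int) := by
      have := Int.natAbs_pos.mpr h1; exact_mod_cast this
    have hp2 : (0:Int) < (multiple2.natAbs : Int) := by
      have := Int.natAbs_pos.mpr h2; exact_mod_cast this
    rw [List.mem_filter, PySem.List.mem_pyRange_one,
        PySem.Set.mem_union, PySem.Set.mem_ofList, PySem.Set.mem_ofList,
        PySem.List.mem_pyRange_iff_of_pos hp1, PySem.List.mem_pyRange_iff_of_pos hp2]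
    simp only [pvPred, decide_eq_true_eq, PySem.Int.mod_eq_zero_iff_dvd,
        Int.sub_zero, Int.natAbs_dvd]
    constructor
    · rintro ⟨⟨hx0, hxl⟩, h | h⟩
      · exact Or.inl ⟨hx0, hxl, h⟩
      · exact Or.inr ⟨hx0, hxl, h⟩
    · rintro (⟨hx0, hxl, h⟩ | ⟨hx0, hxl, h⟩)
      · exact ⟨⟨hx0, hxl⟩, Or.inl h⟩
      · exact ⟨⟨hx0, hxl⟩, Or.inr h⟩
  · exact (PySem.List.pairwise_lt_pyRange_one 0 limit).filter _

-- ===== VERDICT (by name: the statement is the Claim_ definition above) =====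
theorem commonMultiplesList_spec : Claim_equal_commonMultiplesList := by
  intro limit multiple1 multiple2 _ hpre
  unfold Spec_commonMultiplesList commonMultiplesList
  rw [commonMultiplesListGo_eq_filter, List.nil_append,
      commonMultiplesList_alt_eq_filter limit multiple1 multiple2 hpre.1 hpre.2]
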